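-- pv_equiv track=rewrite | github.com/LeanVibe/bee-hive | app/core/extended_thinking_engine.py | _extract_common_themes
-- ===== SOURCE A (Python) =====
-- from typing import Any, Dict, List, Optional, Set
--
-- def _extract_common_themes(contributions: Dict[str, str]) -> List[str]:
--     """Extract common themes from agent contributions."""
--     # Simple keyword-based theme extraction
--     common_keywords = ["recommend", "suggest", "propose", "implement", "design", "use"]
--     themes = []
--
--     for keyword in common_keywords:
--         matching_contributions = [
--             contrib for contrib in contributions.values()
--             if keyword in contrib.lower()
--         ]
--
--         if len(matching_contributions) >= len(contributions) // 2:  # Majority agreement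
--             themes.append(f"Multiple agents {keyword} similar approaches")
--
--     return themes[:5]  # Limit to top 5 themes
-- ===== SOURCE B (Python) =====
-- def _extract_common_themes(contributions):
--     """Extract common themes from agent contributions."""
--     common_keywords = ["recommend", "suggest", "propose", "implement", "design", "use"]
--     values = list(contributions.values())
--     need = len(values) // 2
--     themes = []
--     for keyword in common_keywords:
--         remaining = need
--         if remaining <= 0:
--             themes.append(f"Multiple agents {keyword} similar approaches")
--         else:
--             for contrib in values:
--                 if keyword in contrib.lower():
--                     remaining -= 1
--                     if remaining == 0:
--                         themes.append(f"Multiple agents {keyword} similar approaches")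
--                         break
--         if len(themes) == 5:
--             break
--     return themes
-- ===== Notes on version B (the rewrite author's own statement) =====
-- stated objective: alternative
-- what changed: B never counts or collects matches: per keyword it runs a short-circuit countdown scan that stops as soon as the majority threshold is reachable, skips scanning entirely when the threshold is 0, and breaks out of the keyword loop the moment 5 themes exist (no list of matching contributions, no count comparison, no final slice).
import Mathlib
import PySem

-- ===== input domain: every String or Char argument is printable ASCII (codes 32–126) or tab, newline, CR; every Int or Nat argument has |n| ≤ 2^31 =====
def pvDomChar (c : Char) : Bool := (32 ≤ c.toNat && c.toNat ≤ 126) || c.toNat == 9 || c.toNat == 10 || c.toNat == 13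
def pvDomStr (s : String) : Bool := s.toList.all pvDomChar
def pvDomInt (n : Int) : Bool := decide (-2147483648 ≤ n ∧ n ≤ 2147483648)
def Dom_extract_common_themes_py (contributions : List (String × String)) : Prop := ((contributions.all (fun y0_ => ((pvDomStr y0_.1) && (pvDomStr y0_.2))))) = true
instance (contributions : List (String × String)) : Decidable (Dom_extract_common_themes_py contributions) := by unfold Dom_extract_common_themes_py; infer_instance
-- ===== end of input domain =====

-- B decides each keyword's majority by a short-circuit countdown scan (stopping at the
-- threshold, skipping the scan when the threshold is 0, breaking at 5 themes) instead of
-- A's build-the-matching-list, compare-its-length, slice approach; same result.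

def pvCommonKeywords : List String :=
  ["recommend", "suggest", "propose", "implement", "design", "use"]

-- ===== PORT A =====
-- for keyword in common_keywords: build matching list, compare length against len(contributions)//2, slice [:5]
def extract_common_themes_py (contributions : List (String × String)) : List String :=
  let themes : List String :=
    pvCommonKeywords.foldl
      (fun themes keyword =>
        let matching :=
          (contributions.map Prod.snd).filter
            (fun contrib => PySem.Str.isIn keyword (PySem.Str.lower contrib))
        if (matching.length : Int) ≥ PySem.Int.floordiv (contributions.length : Int) 2 then
          themes ++ ["Multiple agents " ++ keyword ++ " similar approaches"]
        else themes)
      []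
  PySem.List.slice themes none (some 5)

-- ===== PORT B =====
def pvThemeB (keyword : String) : String :=
  "Multiple agents " ++ keyword ++ " similar approaches"

-- inner for-loop of B: countdown scan over the values, breaking (true) when it hits 0
def pvScanB (keyword : String) (vals : List String) (remaining : Int) : Bool :=
  match vals with
  | [] => false
  | contrib :: vs =>
    if PySem.Str.isIn keyword (PySem.Str.lower contrib) then
      if remaining - 1 = 0 then true
      else pvScanB keyword vs (remaining - 1)
    else pvScanB keyword vs remaining

-- keyword loop of B: append on threshold-0 or successful scan, break at 5 themes
def pvOuterB (vals : List String) (need : Int) (ks : List String) (themes : List String) : List String :=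
  match ks with
  | [] => themes
  | keyword :: ks' =>
    let themes' :=
      if need ≤ 0 then themes ++ [pvThemeB keyword]
      else if pvScanB keyword vals need then themes ++ [pvThemeB keyword]
      else themes
    if themes'.length = 5 then themes' else pvOuterB vals need ks' themes'

def extract_common_themes_py_alt (contributions : List (String × String)) : List String :=
  let values := contributions.map Prod.snd
  let need := PySem.Int.floordiv (values.length : Int) 2
  pvOuterB values need pvCommonKeywords []

-- ===== PRECONDITION & SPEC =====
def Spec_extract_common_themes_py (contributions : List (String × String)) (out : List String) : Prop := out = extract_common_themes_py_alt contributions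
instance (contributions : List (String × String)) (out : List String) : Decidable (Spec_extract_common_themes_py contributions out) := by unfold Spec_extract_common_themes_py; infer_instance

-- ===== CLAIM =====
def Claim_equal_extract_common_themes_py : Prop := ∀ (contributions : List (String × String)), Dom_extract_common_themes_py contributions → Spec_extract_common_themes_py contributions (extract_common_themes_py contributions)

-- ===== LEMMAS AND PROOFS =====

-- the short-circuit countdown scan succeeds iff the full match count reaches the threshold
theorem pvScanB_iff (keyword : String) (vals : List String) (r : Int) (hr : 1 ≤ r) :
    pvScanB keyword vals r = true ↔
      r ≤ (vals.countP (fun v => PySem.Str.isIn keyword (PySem.Str.lower v)) : Int) := by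
  induction vals generalizing r with
  | nil => simp [pvScanB]; omega
  | cons v vs ih =>
    simp only [pvScanB, List.countP_cons]
    have hc0 : (0 : Int) ≤ (vs.countP (fun v => PySem.Str.isIn keyword (PySem.Str.lower v)) : Int) :=
      Int.natCast_nonneg _
    by_cases hm : PySem.Str.isIn keyword (PySem.Str.lower v) = true
    · have h1eq : (if PySem.Str.isIn keyword (PySem.Str.lower v) = true then 1 else 0) = 1 :=
        if_pos hm
      rw [if_pos hm, h1eq]
      by_cases h1 : r - 1 = 0
      · rw [if_pos h1]
        constructor
        · intro _; push_cast; omega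
        · intro _; rfl
      · rw [if_neg h1, ih (r - 1) (by omega)]
        push_cast; omega
    · have h0eq : (if PySem.Str.isIn keyword (PySem.Str.lower v) = true then 1 else 0) = 0 :=
        if_neg hm
      rw [if_neg hm, ih r hr, h0eq, Nat.add_zero]

-- the Boolean condition B's per-keyword step realises
def pvCondB (vals : List String) (need : Int) (keyword : String) : Bool :=
  decide (need ≤ (vals.countP (fun v => PySem.Str.isIn keyword (PySem.Str.lower v)) : Int))

theorem pvOuterB_step (vals : List String) (need : Int) (keyword : String) (themes : List String) :
    (if need ≤ 0 then themes ++ [pvThemeB keyword]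
     else if pvScanB keyword vals need then themes ++ [pvThemeB keyword]
     else themes)
    = (if pvCondB vals need keyword then themes ++ [pvThemeB keyword] else themes) := by
  have hc0 : (0 : Int) ≤ (vals.countP (fun v => PySem.Str.isIn keyword (PySem.Str.lower v)) : Int) :=
    Int.natCast_nonneg _
  by_cases h0 : need ≤ 0
  · rw [if_pos h0]
    have hc : pvCondB vals need keyword = true := by
      simp only [pvCondB, decide_eq_true_eq]; omega
    rw [hc, if_pos rfl]
  · rw [if_neg h0]
    have hiff := pvScanB_iff keyword vals need (by omega)
    by_cases hs : pvScanB keyword vals need = true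
    · have hc : pvCondB vals need keyword = true := by
        simp only [pvCondB, decide_eq_true_eq]; exact hiff.mp hs
      rw [if_pos hs, hc, if_pos rfl]
    · have hc : pvCondB vals need keyword = false := by
        simp only [pvCondB, decide_eq_false_iff_not]
        exact fun h => hs (hiff.mpr h)
      rw [if_neg hs, hc]
      simp

-- the break-at-5 keyword loop computes take 5 of the unconditional append-if fold
theorem pvOuterB_take (vals : List String) (need : Int) (ks : List String) :
    ∀ themes : List String, themes.length < 5 →
      pvOuterB vals need ks themes
        = (themes ++ (ks.filter (pvCondB vals need)).map pvThemeB).take 5 := by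
  induction ks with
  | nil =>
    intro themes h
    simp [pvOuterB, List.take_of_length_le, Nat.le_of_lt h]
  | cons k ks ih =>
    intro themes h
    simp only [pvOuterB, pvOuterB_step]
    cases hc : pvCondB vals need k with
    | true =>
      simp only [reduceIte, List.filter_cons, hc, List.map_cons]
      by_cases h5 : (themes ++ [pvThemeB k]).length = 5
      · rw [if_pos h5]
        have heq : themes ++ pvThemeB k :: (ks.filter (pvCondB vals need)).map pvThemeB
            = (themes ++ [pvThemeB k]) ++ (ks.filter (pvCondB vals need)).map pvThemeB := by
          simp
        rw [heq, List.take_append_of_le_length (by omega), List.take_of_length_le (by omega)]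
      · rw [if_neg h5, ih (themes ++ [pvThemeB k]) (by simp at h5 ⊢; omega)]
        simp
    | false =>
      simp only [reduceIte, List.filter_cons, hc, Bool.false_eq_true]
      rw [if_neg (by omega : ¬ themes.length = 5), ih themes h]

theorem pv_slice5 (xs : List String) : PySem.List.slice xs none (some 5) = xs.take 5 := by
  rw [show ((5 : Int)) = ((5 : Nat) : Int) by norm_num, PySem.List.slice_to_natCast]

theorem extract_common_themes_py_eq (contributions : List (String × String)) :
    extract_common_themes_py contributions = extract_common_themes_py_alt contributions := by
  simp only [extract_common_themes_py, extract_common_themes_py_alt]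
  rw [pv_slice5, pvOuterB_take _ _ _ [] (by simp)]
  refine congrArg (List.take 5) ?_
  have hstep : ∀ (themes : List String), ∀ k ∈ pvCommonKeywords,
      (if (((((contributions.map Prod.snd).filter
              (fun contrib => PySem.Str.isIn k (PySem.Str.lower contrib))).length : Int)
            ≥ PySem.Int.floordiv (contributions.length : Int) 2) : Prop) then
         themes ++ ["Multiple agents " ++ k ++ " similar approaches"]
       else themes)
        = (if pvCondB (contributions.map Prod.snd)
              (PySem.Int.floordiv ((contributions.map Prod.snd).length : Int) 2) k = true then
             themes ++ [pvThemeB k]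
           else themes) := by
    intro themes k _
    have hiff : pvCondB (contributions.map Prod.snd)
          (PySem.Int.floordiv ((contributions.map Prod.snd).length : Int) 2) k = true
        ↔ ((((contributions.map Prod.snd).filter
              (fun contrib => PySem.Str.isIn k (PySem.Str.lower contrib))).length : Int)
            ≥ PySem.Int.floordiv (contributions.length : Int) 2) := by
      simp only [pvCondB, decide_eq_true_eq, List.countP_eq_length_filter, List.length_map,
        ge_iff_le]
    by_cases hc : pvCondB (contributions.map Prod.snd)
        (PySem.Int.floordiv ((contributions.map Prod.snd).length : Int) 2) k = true
    · rw [if_pos hc, if_pos (hiff.mp hc)]; rfl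
    · rw [if_neg hc, if_neg (fun h => hc (hiff.mpr h))]
  rw [PySem.List.foldl_congr_mem pvCommonKeywords _ _ [] (fun acc k hk => hstep acc k hk),
    PySem.List.foldl_append_if
      (pvCondB (contributions.map Prod.snd)
        (PySem.Int.floordiv ((contributions.map Prod.snd).length : Int) 2))
      pvThemeB pvCommonKeywords []]

-- ===== VERDICT (by name: the statement is the Claim_ definition above) =====
theorem extract_common_themes_py_spec : Claim_equal_extract_common_themes_py := by
  intro contributions _
  exact extract_common_themes_py_eq contributions
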